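-- pv_equiv track=rewrite | github.com/chandramgc/py-projects | src/modules/p_rule_counter.py | get_specific_rules
-- ===== SOURCE A (Python) =====
-- def get_specific_rules(file_rules=None):
--     """
--     Computes the rules that are unique (specific) to each file.
--
--     Args:
--         file_rules (dict, optional): A dictionary mapping file names to sets of rules.
--
--     Returns:
--         dict: A dictionary mapping each file name to the set of rules unique to that file.
--     """
--     file_rules = file_rules if file_rules is not None else file_rules
--     specific = {}
--     for file, rules in file_rules.items():
--         others = set()
--         for other_file, other_rules in file_rules.items():
--             if other_file != file:
--                 others = others.union(other_rules)
--         specific[file] = rules - others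
--     return specific
-- ===== SOURCE B (Python) =====
-- def get_specific_rules(file_rules=None):
--     count = {}
--     for rules in file_rules.values():
--         for r in rules:
--             count[r] = count.get(r, 0) + 1
--     return {file: {r for r in rules if count[r] == 1}
--             for file, rules in file_rules.items()}
-- ===== Notes on version B (the rewrite author's own statement) =====
-- stated objective: faster
-- what changed: Instead of re-unioning all other files' rule sets for every file (a quadratic double scan), B builds one occurrence counter over all rules in a single pass and keeps, per file, the rules whose file-count is 1.
import Mathlib
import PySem

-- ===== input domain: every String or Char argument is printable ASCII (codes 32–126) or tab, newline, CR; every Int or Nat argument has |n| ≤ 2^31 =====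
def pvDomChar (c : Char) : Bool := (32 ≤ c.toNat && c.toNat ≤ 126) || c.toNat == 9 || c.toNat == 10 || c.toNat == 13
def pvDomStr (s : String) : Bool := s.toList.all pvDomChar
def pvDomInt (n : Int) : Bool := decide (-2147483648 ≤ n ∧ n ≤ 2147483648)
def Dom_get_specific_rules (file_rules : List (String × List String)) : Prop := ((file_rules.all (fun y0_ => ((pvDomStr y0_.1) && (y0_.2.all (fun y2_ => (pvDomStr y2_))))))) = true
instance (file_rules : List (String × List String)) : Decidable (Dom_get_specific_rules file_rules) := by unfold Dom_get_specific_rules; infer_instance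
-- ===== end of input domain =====

-- B replaces A's per-file union over all OTHER files (quadratic in the number of files)
-- by one global occurrence counter and a per-file filter for count 1.

-- ===== PORT A =====
def get_specific_rules (file_rules : List (String × List String)) : List (String × List String) :=
  (file_rules.foldl (fun specific p =>
    let others := file_rules.foldl (fun others q =>
      if q.1 ≠ p.1 then PySem.Set.union others q.2 else others) PySem.Set.empty
    specific.insert p.1 (PySem.Set.diff p.2 others)) PySem.Dict.empty).items

-- ===== PORT B =====
def get_specific_rules_alt (file_rules : List (String × List String)) : List (String × List String) :=
  let count := file_rules.foldl (fun d p =>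
    p.2.foldl (fun d r => d.insert r (d.getD r 0 + 1)) d) (PySem.Dict.empty (κ := String) (ν := Int))
  file_rules.map (fun p => (p.1, p.2.filter (fun r => count.getD r 0 == 1)))

-- ===== PRECONDITION & SPEC =====
-- The Python argument is a dict of sets: the List encoding represents it with pairwise-distinct
-- keys and duplicate-free rule lists; Pre_ states exactly that representation invariant
-- (no Python-constructible dict-of-sets input is excluded).
def Pre_get_specific_rules (file_rules : List (String × List String)) : Prop :=
  (file_rules.map Prod.fst).Nodup ∧ ∀ p ∈ file_rules, p.2.Nodup
instance (file_rules : List (String × List String)) : Decidable (Pre_get_specific_rules file_rules) := by unfold Pre_get_specific_rules; infer_instance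

def pvWitness_get_specific_rules : (List (String × List String)) :=
  [("a.py", ["r1", "r2"]), ("b.py", ["r2", "r3"])]

def Spec_get_specific_rules (file_rules : List (String × List String)) (out : List (String × List String)) : Prop := out = get_specific_rules_alt file_rules
instance (file_rules : List (String × List String)) (out : List (String × List String)) : Decidable (Spec_get_specific_rules file_rules out) := by unfold Spec_get_specific_rules; infer_instance

-- ===== CLAIM (what is proved, stated in full; the proofs are below) =====
def Claim_equal_get_specific_rules : Prop := ∀ (file_rules : List (String × List String)), Dom_get_specific_rules file_rules → Pre_get_specific_rules file_rules → Spec_get_specific_rules file_rules (get_specific_rules file_rules)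

-- ===== LEMMAS AND PROOFS =====

-- B's counter over all files equals the element count in the flattened rules.
theorem countD_eq (file_rules : List (String × List String)) (d : PySem.Dict String Int) (r : String) :
    (file_rules.foldl (fun d p => p.2.foldl (fun d r => d.insert r (d.getD r 0 + 1)) d) d).getD r 0
      = d.getD r 0 + ((file_rules.flatMap Prod.snd).count r : Int) := by
  induction file_rules generalizing d with
  | nil => simp
  | cons p t ih =>
      simp only [List.foldl_cons, List.flatMap_cons, List.count_append, ih,
        PySem.Dict.getD_foldl_insert_add_one]
      push_cast; ring

-- membership in A's accumulated union of the other files' rules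
theorem mem_others (file_rules : List (String × List String)) (f r : String) (s : PySem.Set String) :
    r ∈ file_rules.foldl (fun others q =>
        if q.1 ≠ f then PySem.Set.union others q.2 else others) s
      ↔ r ∈ s ∨ ∃ q ∈ file_rules, q.1 ≠ f ∧ r ∈ q.2 := by
  induction file_rules generalizing s with
  | nil => simp
  | cons p t ih =>
      simp only [List.foldl_cons]
      rw [ih]
      by_cases h : p.1 = f
      · rw [if_neg (by simp [h])]
        constructor
        · rintro (hs | ⟨q, hq1, hq2, hq3⟩)
          · exact Or.inl hs
          · exact Or.inr ⟨q, List.mem_cons_of_mem _ hq1, hq2, hq3⟩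
        · rintro (hs | ⟨q, hq1, hq2, hq3⟩)
          · exact Or.inl hs
          · rcases List.mem_cons.mp hq1 with rfl | hq1
            · exact absurd h hq2
            · exact Or.inr ⟨q, hq1, hq2, hq3⟩
      · rw [if_pos h, PySem.Set.mem_union]
        constructor
        · rintro (⟨hs | hp⟩ | ⟨q, hq1, hq2, hq3⟩)
          · exact Or.inl hs
          · exact Or.inr ⟨p, List.mem_cons_self .., h, hp⟩
          · exact Or.inr ⟨q, List.mem_cons_of_mem _ hq1, hq2, hq3⟩
        · rintro (hs | ⟨q, hq1, hq2, hq3⟩)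
          · exact Or.inl (Or.inl hs)
          · rcases List.mem_cons.mp hq1 with rfl | hq1
            · exact Or.inl (Or.inr hq3)
            · exact Or.inr ⟨q, hq1, hq2, hq3⟩

-- the flattened count is 1 exactly when no OTHER entry's rules contain r
theorem count_one_iff (L : List (String × List String)) (p : String × List String) (r : String)
    (hk : (L.map Prod.fst).Nodup) (hv : ∀ q ∈ L, q.2.Nodup) (hp : p ∈ L) (hr : r ∈ p.2) :
    (L.flatMap Prod.snd).count r = 1 ↔ ∀ q ∈ L, q.1 ≠ p.1 → r ∉ q.2 := by
  induction L with
  | nil => cases hp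
  | cons q t ih =>
      simp only [List.flatMap_cons, List.count_append]
      have hk' : q.1 ∉ t.map Prod.fst ∧ (t.map Prod.fst).Nodup := by
        rw [List.map_cons] at hk
        exact List.nodup_cons.mp hk
      have hhead := hk'.1
      rcases List.mem_cons.mp hp with rfl | hpt
      · have h1 : p.2.count r = 1 := List.count_eq_one_of_mem (hv p (List.mem_cons_self ..)) hr
        constructor
        · intro h q' hq' hne
          rcases List.mem_cons.mp hq' with rfl | hq't
          · exact absurd rfl hne
          · intro hrq
            have : 0 < (t.flatMap Prod.snd).count r :=
              List.count_pos_iff.mpr (List.mem_flatMap.mpr ⟨q', hq't, hrq⟩)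
            omega
        · intro h
          have : (t.flatMap Prod.snd).count r = 0 := by
            rw [List.count_eq_zero]
            intro hmem
            obtain ⟨q', hq't, hrq⟩ := List.mem_flatMap.mp hmem
            have hne : q'.1 ≠ p.1 := fun he => hhead (he ▸ List.mem_map_of_mem hq't)
            exact h q' (List.mem_cons_of_mem _ hq't) hne hrq
          omega
      · have hq_ne : q.1 ≠ p.1 := by
          intro he
          exact hhead (he ▸ List.mem_map_of_mem hpt)
        have hc1 : 0 < (t.flatMap Prod.snd).count r :=
          List.count_pos_iff.mpr (List.mem_flatMap.mpr ⟨p, hpt, hr⟩)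
        have iht := ih hk'.2
          (fun q' h' => hv q' (List.mem_cons_of_mem _ h')) hpt
        constructor
        · intro h q' hq' hne
          rcases List.mem_cons.mp hq' with rfl | hq't
          · rw [← List.count_eq_zero (a := r) (l := q'.2)]; omega
          · have : (t.flatMap Prod.snd).count r = 1 := by omega
            exact iht.mp this q' hq't hne
        · intro h
          have hq0 : q.2.count r = 0 :=
            List.count_eq_zero.mpr (h q (List.mem_cons_self ..) hq_ne)
          have ht1 : (t.flatMap Prod.snd).count r = 1 :=
            iht.mpr (fun q' hq' hne => h q' (List.mem_cons_of_mem _ hq') hne)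
          omega

-- per-entry value equality: A's "rules - others" is B's "rules with global count 1"
theorem value_eq (file_rules : List (String × List String)) (p : String × List String)
    (hk : (file_rules.map Prod.fst).Nodup) (hv : ∀ q ∈ file_rules, q.2.Nodup)
    (hp : p ∈ file_rules) :
    PySem.Set.diff p.2 (file_rules.foldl (fun others q =>
        if q.1 ≠ p.1 then PySem.Set.union others q.2 else others) PySem.Set.empty)
      = p.2.filter (fun r =>
          ((file_rules.foldl (fun d q => q.2.foldl (fun d r => d.insert r (d.getD r 0 + 1)) d)
            (PySem.Dict.empty (κ := String) (ν := Int))).getD r 0 == 1)) := by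
  unfold PySem.Set.diff
  refine List.filter_congr (fun r hr => ?_)
  rw [Bool.eq_iff_iff, Bool.not_eq_true', ← Bool.not_eq_true]
  rw [PySem.Set.contains_iff, mem_others, countD_eq, PySem.Dict.getD_empty, zero_add, beq_iff_eq]
  rw [show ((((file_rules.flatMap Prod.snd).count r : Int)) = 1 ↔
        (file_rules.flatMap Prod.snd).count r = 1) by exact_mod_cast Iff.rfl]
  rw [count_one_iff file_rules p r hk hv hp hr]
  constructor
  · intro h q hq hne hrq
    exact h (Or.inr ⟨q, hq, hne, hrq⟩)
  · rintro h (hs | ⟨q, hq, hne, hrq⟩)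
    · simp [PySem.Set.empty] at hs
    · exact h q hq hne hrq

-- ===== VERDICT (by name: the statement is the Claim_ definition above) =====
theorem get_specific_rules_spec : Claim_equal_get_specific_rules := by
  intro file_rules _hdom hpre
  obtain ⟨hk, hv⟩ := hpre
  unfold Spec_get_specific_rules get_specific_rules get_specific_rules_alt
  rw [PySem.Dict.items_foldl_insert_fresh _ _ _ _ (by simp [PySem.Dict.contains_empty]) hk]
  simp only [show (PySem.Dict.empty (κ := String) (ν := List String)).items = [] from rfl,
    List.nil_append]
  exact List.map_congr_left (fun p hp => by rw [value_eq file_rules p hk hv hp])
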